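-- pv_equiv track=rewrite | github.com/te31eawq/AI_CCTV | Choi_Jae_Won/turtlebot_detect/turtlebot3_final_speed_애매한 완성.py | filter_similar_lines
-- ===== SOURCE A (Python) =====
-- def filter_similar_lines(green_points, threshold=100):
--     """
--     y값이 비슷한 선분들을 필터링하여 하나만 남기기
--     threshold는 y값의 차이가 이 값 이하인 선분을 비슷하다고 판단하여 제외한다.
--     """
--     filtered_lines = []
--
--     for i, points1 in enumerate(green_points):
--         # 현재 선분의 y값
--         _, y1 = points1[0]
--         _, y2 = points1[1]
--         avg_y1 = (y1 + y2) // 2  # 선분의 평균 y값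
--
--         # 다른 선분들과 비교
--         is_similar = False
--         for j, points2 in enumerate(filtered_lines):
--             _, y3 = points2[0]
--             _, y4 = points2[1]
--             avg_y2 = (y3 + y4) // 2  # 선분의 평균 y값
--
--             # 평균 y값 차이가 threshold 이내면 비슷한 선분으로 판단
--             if abs(avg_y1 - avg_y2) < threshold:
--                 is_similar = True
--                 break
--
--         # 비슷한 선분이 없으면 추가
--         if not is_similar:
--             filtered_lines.append(points1)
--
--     return filtered_lines
-- ===== SOURCE B (Python) =====
-- def filter_similar_lines(green_points, threshold=100):
--     """Keep each line whose average y is at least `threshold` away from every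
--     previously kept line's average y.  Instead of rescanning all kept lines,
--     maintain the kept averages in a sorted list and binary-search the
--     insertion point: only the two neighbours can be within threshold."""
--     filtered_lines = []
--     kept = []  # sorted averages of kept lines
--     for points1 in green_points:
--         _, y1 = points1[0]
--         _, y2 = points1[1]
--         a = (y1 + y2) // 2
--         # leftmost index with kept[lo] >= a (hand-rolled bisect_left)
--         lo, hi = 0, len(kept)
--         while lo < hi:
--             mid = (lo + hi) // 2
--             if kept[mid] < a:
--                 lo = mid + 1
--             else:
--                 hi = mid
--         similar = (lo < len(kept) and kept[lo] - a < threshold) or \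
--                   (lo > 0 and a - kept[lo - 1] < threshold)
--         if not similar:
--             filtered_lines.append(points1)
--             kept.insert(lo, a)
--     return filtered_lines
-- ===== Notes on version B (the rewrite author's own statement) =====
-- stated objective: alternative
-- what changed: A rescans every kept line for each new line; B keeps the kept lines' average-y values in a sorted list and binary-searches the insertion point, checking only the two neighbours.
import Mathlib
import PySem

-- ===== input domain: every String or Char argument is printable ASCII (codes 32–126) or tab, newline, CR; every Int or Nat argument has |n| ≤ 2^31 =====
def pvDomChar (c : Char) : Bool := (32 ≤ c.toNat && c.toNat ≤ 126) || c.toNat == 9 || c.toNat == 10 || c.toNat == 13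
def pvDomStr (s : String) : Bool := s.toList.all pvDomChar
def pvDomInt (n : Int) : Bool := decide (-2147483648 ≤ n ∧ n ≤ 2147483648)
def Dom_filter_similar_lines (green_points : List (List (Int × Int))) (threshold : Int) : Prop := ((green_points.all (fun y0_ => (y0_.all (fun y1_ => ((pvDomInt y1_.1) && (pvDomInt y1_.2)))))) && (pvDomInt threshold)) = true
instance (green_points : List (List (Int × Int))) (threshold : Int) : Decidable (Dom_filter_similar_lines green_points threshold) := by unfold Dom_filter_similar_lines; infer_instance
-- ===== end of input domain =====

-- B replaces A's inner rescan of all kept lines by a sorted list of kept average-y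
-- values with a hand-rolled binary search: only the two neighbours of the insertion
-- point need checking (asymptotically fewer comparisons; not timed measurably here).

-- ===== PORT A =====
-- average y of a line: (points[0].y + points[1].y) // 2; (0,0) fallback is unreachable under Pre_
def pvAvgY (l : List (Int × Int)) : Int :=
  PySem.Int.floordiv (((PySem.List.pyGet? l 0).getD (0, 0)).2 + ((PySem.List.pyGet? l 1).getD (0, 0)).2) 2

-- inner 'for points2 in filtered_lines: ... break' loop of A
def pvSimLoop (filtered : List (List (Int × Int))) (avg_y1 threshold : Int) : Bool :=
  match filtered with
  | [] => false
  | points2 :: rest =>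
      if |avg_y1 - pvAvgY points2| < threshold then true
      else pvSimLoop rest avg_y1 threshold

def pvStepA (threshold : Int) (filtered : List (List (Int × Int))) (points1 : List (Int × Int)) :
    List (List (Int × Int)) :=
  if pvSimLoop filtered (pvAvgY points1) threshold then filtered else filtered ++ [points1]

def filter_similar_lines (green_points : List (List (Int × Int))) (threshold : Int) :
    List (List (Int × Int)) :=
  green_points.foldl (pvStepA threshold) []

-- ===== PORT B =====
-- hand-rolled bisect_left while-loop of Source B; the fuel (= hi - lo at the call) only
-- makes the loop structurally recursive, it never changes the computed value
def pvBisectFuel (kept : List Int) (a : Int) : Nat → Nat → Nat → Nat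
  | 0, lo, _hi => lo
  | n + 1, lo, hi =>
      if lo < hi then
        if kept.getD ((lo + hi) / 2) 0 < a then pvBisectFuel kept a n ((lo + hi) / 2 + 1) hi
        else pvBisectFuel kept a n lo ((lo + hi) / 2)
      else lo

def pvBisect (kept : List Int) (a : Int) (lo hi : Nat) : Nat :=
  pvBisectFuel kept a (hi - lo) lo hi

def pvStepB (threshold : Int) (st : List (List (Int × Int)) × List Int)
    (points1 : List (Int × Int)) : List (List (Int × Int)) × List Int :=
  let a := pvAvgY points1
  let kept := st.2
  let lo := pvBisect kept a 0 kept.length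
  if (lo < kept.length ∧ kept.getD lo 0 - a < threshold) ∨
     (0 < lo ∧ a - kept.getD (lo - 1) 0 < threshold) then st
  else (st.1 ++ [points1], kept.insertIdx lo a)

def filter_similar_lines_alt (green_points : List (List (Int × Int))) (threshold : Int) :
    List (List (Int × Int)) :=
  (green_points.foldl (pvStepB threshold) ([], [])).1

-- ===== PRECONDITION & SPEC =====
-- A raises IndexError (points1[0] / points1[1]) when some line has fewer than 2 points.
def Pre_filter_similar_lines (green_points : List (List (Int × Int))) (threshold : Int) : Prop :=
  ∀ l ∈ green_points, 2 ≤ l.length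
instance (green_points : List (List (Int × Int))) (threshold : Int) : Decidable (Pre_filter_similar_lines green_points threshold) := by unfold Pre_filter_similar_lines; infer_instance
def pvWitness_filter_similar_lines : (List (List (Int × Int))) × Int :=
  ([[(0, 0), (0, 2)], [(1, 300), (1, 302)], [(2, 310), (2, 308)]], 100)

def Spec_filter_similar_lines (green_points : List (List (Int × Int))) (threshold : Int) (out : List (List (Int × Int))) : Prop := out = filter_similar_lines_alt green_points threshold
instance (green_points : List (List (Int × Int))) (threshold : Int) (out : List (List (Int × Int))) : Decidable (Spec_filter_similar_lines green_points threshold out) := by unfold Spec_filter_similar_lines; infer_instance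

-- ===== CLAIM (what is proved, stated in full; the proofs are below) =====
def Claim_equal_filter_similar_lines : Prop := ∀ (green_points : List (List (Int × Int))) (threshold : Int), Dom_filter_similar_lines green_points threshold → Pre_filter_similar_lines green_points threshold → Spec_filter_similar_lines green_points threshold (filter_similar_lines green_points threshold)

-- ===== LEMMAS AND PROOFS =====

-- A's inner loop decides "some kept line has average y within threshold"
lemma pvSimLoop_iff (filtered : List (List (Int × Int))) (a t : Int) :
    pvSimLoop filtered a t = true ↔ ∃ y ∈ filtered.map pvAvgY, |a - y| < t := by
  induction filtered with
  | nil => simp [pvSimLoop]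
  | cons p rest ih =>
      simp only [pvSimLoop, List.map_cons, List.mem_cons]
      split_ifs with h
      · simp only [true_iff]
        exact ⟨pvAvgY p, Or.inl rfl, h⟩
      · rw [ih]
        constructor
        · rintro ⟨y, hy, hlt⟩; exact ⟨y, Or.inr hy, hlt⟩
        · rintro ⟨y, hy, hlt⟩
          rcases hy with rfl | hy
          · exact absurd hlt h
          · exact ⟨y, hy, hlt⟩

-- binary-search invariant; conclusion characterises the returned index
lemma pvBisectFuel_spec (kept : List Int) (a : Int) (hs : kept.Pairwise (· ≤ ·)) :
    ∀ n lo hi, hi - lo ≤ n → lo ≤ hi → hi ≤ kept.length →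
      (∀ i, i < lo → kept.getD i 0 < a) →
      (∀ i, hi ≤ i → i < kept.length → a ≤ kept.getD i 0) →
      pvBisectFuel kept a n lo hi ≤ kept.length ∧
      (∀ i, i < pvBisectFuel kept a n lo hi → kept.getD i 0 < a) ∧
      (∀ i, pvBisectFuel kept a n lo hi ≤ i → i < kept.length → a ≤ kept.getD i 0) := by
  have hmono : ∀ i j, i ≤ j → j < kept.length → kept.getD i 0 ≤ kept.getD j 0 := by
    intro i j hij hj
    rcases eq_or_lt_of_le hij with rfl | hlt
    · exact le_refl _
    · rw [List.getD_eq_getElem _ _ (lt_trans hlt hj), List.getD_eq_getElem _ _ hj]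
      exact List.pairwise_iff_getElem.mp hs i j _ _ hlt
  intro n
  induction n with
  | zero =>
      intro lo hi hmeas hlohi hhile hlosm hhige
      simp only [pvBisectFuel]
      exact ⟨by omega, hlosm, fun i h1 h2 => hhige i (by omega) h2⟩
  | succ m ih =>
      intro lo hi hmeas hlohi hhile hlosm hhige
      simp only [pvBisectFuel]
      split_ifs with hlt hcmp
      · -- kept[mid] < a : recurse right
        exact ih _ _ (by omega) (by omega) hhile
          (by
            intro i hi'
            by_cases hile : i ≤ (lo + hi) / 2
            · exact lt_of_le_of_lt (hmono i _ hile (by omega)) hcmp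
            · omega)
          hhige
      · -- a ≤ kept[mid] : recurse left
        exact ih _ _ (by omega) (by omega) (by omega) hlosm
          (by
            intro i h1 h2
            exact le_trans (not_lt.mp hcmp) (hmono _ i h1 h2))
      · exact ⟨by omega, hlosm, fun i h1 h2 => hhige i (by omega) h2⟩

lemma pvBisect_spec (kept : List Int) (a : Int) (hs : kept.Pairwise (· ≤ ·)) :
    pvBisect kept a 0 kept.length ≤ kept.length ∧
    (∀ i, i < pvBisect kept a 0 kept.length → kept.getD i 0 < a) ∧
    (∀ i, pvBisect kept a 0 kept.length ≤ i → i < kept.length → a ≤ kept.getD i 0) := by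
  unfold pvBisect
  exact pvBisectFuel_spec kept a hs (kept.length - 0) 0 kept.length le_rfl (Nat.zero_le _) le_rfl
    (by omega) (by intro i h1 h2; omega)

-- B's neighbour check decides the same "some kept value within threshold" predicate
lemma neighbour_check_iff (kept : List Int) (a t : Int) (hs : kept.Pairwise (· ≤ ·)) :
    ((pvBisect kept a 0 kept.length < kept.length ∧
        kept.getD (pvBisect kept a 0 kept.length) 0 - a < t) ∨
     (0 < pvBisect kept a 0 kept.length ∧
        a - kept.getD (pvBisect kept a 0 kept.length - 1) 0 < t)) ↔
    ∃ y ∈ kept, |a - y| < t := by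
  obtain ⟨hle, hbelow, habove⟩ := pvBisect_spec kept a hs
  set lo := pvBisect kept a 0 kept.length with hlo
  constructor
  · rintro (⟨hlt, hnear⟩ | ⟨hpos, hnear⟩)
    · refine ⟨kept.getD lo 0, ?_, ?_⟩
      · rw [List.getD_eq_getElem _ _ hlt]; exact List.getElem_mem hlt
      · have := habove lo le_rfl hlt
        rw [abs_sub_lt_iff]; omega
    · have hlt : lo - 1 < kept.length := by omega
      refine ⟨kept.getD (lo - 1) 0, ?_, ?_⟩
      · rw [List.getD_eq_getElem _ _ hlt]; exact List.getElem_mem hlt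
      · have := hbelow (lo - 1) (by omega)
        rw [abs_sub_lt_iff]; omega
  · rintro ⟨y, hy, hnear⟩
    obtain ⟨i, hilen, rfl⟩ := List.mem_iff_getElem.mp hy
    rw [abs_sub_lt_iff] at hnear
    have hgetD : kept.getD i 0 = kept[i] := List.getD_eq_getElem _ _ hilen
    by_cases hcase : i < lo
    · right
      have hpos : 0 < lo := by omega
      refine ⟨hpos, ?_⟩
      have h1 : kept.getD i 0 < a := hbelow i hcase
      have h2 : kept.getD i 0 ≤ kept.getD (lo - 1) 0 := by
        rcases eq_or_lt_of_le (by omega : i ≤ lo - 1) with rfl | hlt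
        · exact le_refl _
        · rw [List.getD_eq_getElem _ _ hilen, List.getD_eq_getElem _ _ (by omega)]
          exact List.pairwise_iff_getElem.mp hs i (lo - 1) _ _ hlt
      rw [hgetD] at h1 h2
      omega
    · left
      refine ⟨by omega, ?_⟩
      have h1 : a ≤ kept.getD i 0 := habove i (by omega) hilen
      have h2 : kept.getD lo 0 ≤ kept.getD i 0 := by
        rcases eq_or_lt_of_le (by omega : lo ≤ i) with rfl | hlt
        · exact le_refl _
        · rw [List.getD_eq_getElem _ _ hilen, List.getD_eq_getElem _ _ (by omega)]
          exact List.pairwise_iff_getElem.mp hs lo i _ _ hlt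
      rw [hgetD] at h1 h2
      omega

-- insertIdx at an in-range index, written as take/drop (no such lemma found in the libraries)
lemma insertIdx_take_drop (a : Int) :
    ∀ (n : Nat) (l : List Int), n ≤ l.length → l.insertIdx n a = l.take n ++ a :: l.drop n := by
  intro n
  induction n with
  | zero => intro l _; simp
  | succ m ih =>
      intro l hl
      cases l with
      | nil => simp at hl
      | cons x xs =>
          simp only [List.insertIdx_succ_cons, List.take_succ_cons, List.drop_succ_cons,
            List.cons_append]
          rw [ih xs (by simpa using hl)]

-- inserting at the returned index keeps the list sorted
lemma insert_sorted (kept : List Int) (a : Int) (hs : kept.Pairwise (· ≤ ·)) :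
    (kept.insertIdx (pvBisect kept a 0 kept.length) a).Pairwise (· ≤ ·) := by
  obtain ⟨hle, hbelow, habove⟩ := pvBisect_spec kept a hs
  set lo := pvBisect kept a 0 kept.length with hlo
  have htake : ∀ x ∈ kept.take lo, x < a := by
    intro x hx
    obtain ⟨i, hilen, rfl⟩ := List.mem_iff_getElem.mp hx
    have hi1 : i < lo := by
      have := hilen; rw [List.length_take] at this; omega
    have hi2 : i < kept.length := by omega
    have := hbelow i hi1
    rw [List.getD_eq_getElem _ _ hi2] at this
    simpa [List.getElem_take] using this
  have hdrop : ∀ y ∈ kept.drop lo, a ≤ y := by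
    intro y hy
    obtain ⟨j, hjlen, rfl⟩ := List.mem_iff_getElem.mp hy
    have hj : lo + j < kept.length := by
      have := hjlen; rw [List.length_drop] at this; omega
    have := habove (lo + j) (by omega) hj
    rw [List.getD_eq_getElem _ _ hj] at this
    simpa [List.getElem_drop] using this
  rw [insertIdx_take_drop a lo kept hle]
  rw [List.pairwise_append]
  refine ⟨List.Pairwise.sublist (List.take_sublist _ _) hs, ?_, ?_⟩
  · rw [List.pairwise_cons]
    exact ⟨hdrop, List.Pairwise.sublist (List.drop_sublist _ _) hs⟩
  · intro x hx y hy
    rcases List.mem_cons.mp hy with rfl | hy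
    · exact le_of_lt (htake x hx)
    · exact le_trans (le_of_lt (htake x hx)) (hdrop y hy)

lemma insert_perm (kept : List Int) (a : Int) (hle : pvBisect kept a 0 kept.length ≤ kept.length) :
    (kept.insertIdx (pvBisect kept a 0 kept.length) a).Perm (a :: kept) := by
  rw [insertIdx_take_drop a _ kept hle]
  have h := List.perm_middle (a := a) (l₁ := kept.take (pvBisect kept a 0 kept.length))
    (l₂ := kept.drop (pvBisect kept a 0 kept.length))
  rw [List.take_append_drop] at h
  exact h

-- the main loop invariant: same kept lines, kept averages sorted
lemma foldl_eq (t : Int) :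
    ∀ (gps : List (List (Int × Int))) (fA : List (List (Int × Int))) (kept : List Int),
      kept.Perm (fA.map pvAvgY) → kept.Pairwise (· ≤ ·) →
      gps.foldl (pvStepA t) fA = (gps.foldl (pvStepB t) (fA, kept)).1 := by
  intro gps
  induction gps with
  | nil => intro fA kept _ _; rfl
  | cons p rest ih =>
      intro fA kept hperm hsorted
      simp only [List.foldl_cons]
      have hcond : pvSimLoop fA (pvAvgY p) t =
          decide ((pvBisect kept (pvAvgY p) 0 kept.length < kept.length ∧
              kept.getD (pvBisect kept (pvAvgY p) 0 kept.length) 0 - pvAvgY p < t) ∨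
            (0 < pvBisect kept (pvAvgY p) 0 kept.length ∧
              pvAvgY p - kept.getD (pvBisect kept (pvAvgY p) 0 kept.length - 1) 0 < t)) := by
        rw [Bool.eq_iff_iff, pvSimLoop_iff, decide_eq_true_iff,
            neighbour_check_iff kept (pvAvgY p) t hsorted]
        constructor
        · rintro ⟨y, hy, h⟩; exact ⟨y, (hperm.mem_iff).mpr hy, h⟩
        · rintro ⟨y, hy, h⟩; exact ⟨y, (hperm.mem_iff).mp hy, h⟩
      obtain ⟨hle, _, _⟩ := pvBisect_spec kept (pvAvgY p) hsorted
      unfold pvStepA pvStepB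
      by_cases hsim : (pvBisect kept (pvAvgY p) 0 kept.length < kept.length ∧
          kept.getD (pvBisect kept (pvAvgY p) 0 kept.length) 0 - pvAvgY p < t) ∨
        (0 < pvBisect kept (pvAvgY p) 0 kept.length ∧
          pvAvgY p - kept.getD (pvBisect kept (pvAvgY p) 0 kept.length - 1) 0 < t)
      · rw [if_pos (by rw [hcond]; exact decide_eq_true hsim), if_pos hsim]
        exact ih fA kept hperm hsorted
      · rw [if_neg (by rw [hcond]; simp only [decide_eq_true_eq]; exact hsim), if_neg hsim]
        refine ih (fA ++ [p]) _ ?_ (insert_sorted kept (pvAvgY p) hsorted)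
        refine (insert_perm kept (pvAvgY p) hle).trans ?_
        have h1 : (pvAvgY p :: kept).Perm (pvAvgY p :: fA.map pvAvgY) := hperm.cons _
        refine h1.trans ?_
        rw [List.map_append]
        simpa using (List.perm_append_singleton (pvAvgY p) (fA.map pvAvgY)).symm

-- ===== VERDICT (by name: the statement is the Claim_ definition above) =====
theorem filter_similar_lines_spec : Claim_equal_filter_similar_lines := by
  intro gps t _hdom _hpre
  unfold Spec_filter_similar_lines filter_similar_lines filter_similar_lines_alt
  exact foldl_eq t gps [] [] (by simp) (by simp)
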